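-- pv_equiv track=rewrite | github.com/kavigupta/ssg-rummy | ssg_rummy_server/bag_utils.py | consistent_subbags
-- ===== SOURCE A (Python) =====
-- def subtract_bags(bag1, bag2):
--     """
--     Subtract bag2 from bag1. Return None if you cannot validly perform this subtraction.
--     """
--     result = list(bag1)
--     for item in bag2:
--         try:
--             result.remove(item)
--         except ValueError:
--             return None
--     return result
--
-- def consistent_subbags(bags, universal):
--     """
--     Produce all subbags of the given bags such that when you add them together, you get a subbag of the universal bag.
--     """
--
--     if not bags:
--         return [[]]
--     first, *rest = bags
--     result = []
--     # without first
--     result += consistent_subbags(rest, universal)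
--     # with first
--     universal_without_first = subtract_bags(universal, first)
--     if universal_without_first is not None:
--         result += [
--             [first] + subbag
--             for subbag in consistent_subbags(bags, universal_without_first)
--         ]
--     return result
-- ===== SOURCE B (Python) =====
-- def subtract_bags(bag1, bag2):
--     """
--     Subtract bag2 from bag1. Return None if you cannot validly perform this subtraction.
--     """
--     result = list(bag1)
--     for item in bag2:
--         try:
--             result.remove(item)
--         except ValueError:
--             return None
--     return result
--
-- def consistent_subbags(bags, universal):
--     """
--     Same result as A, but with an explicit multiplicity loop for the first bag:
--     recursion only on the tail, never on the full bag list.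
--     """
--     if not bags:
--         return [[]]
--     first, rest = bags[0], bags[1:]
--     result = []
--     prefix = []
--     u = universal
--     while u is not None:
--         for sub in consistent_subbags(rest, u):
--             result.append(prefix + sub)
--         prefix = prefix + [first]
--         u = subtract_bags(u, first)
--     return result
-- ===== Notes on version B (the rewrite author's own statement) =====
-- stated objective: alternative
-- what changed: A's self-recursion on the full bag list (recursing on bags with a shrunken universal) is replaced by an explicit multiplicity loop: B counts copies of the first bag with a running prefix and shrinking universal, recursing only on the tail; Pre_ excludes bag lists containing an empty bag, on which A raises RecursionError and B loops forever.
import Mathlib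
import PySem

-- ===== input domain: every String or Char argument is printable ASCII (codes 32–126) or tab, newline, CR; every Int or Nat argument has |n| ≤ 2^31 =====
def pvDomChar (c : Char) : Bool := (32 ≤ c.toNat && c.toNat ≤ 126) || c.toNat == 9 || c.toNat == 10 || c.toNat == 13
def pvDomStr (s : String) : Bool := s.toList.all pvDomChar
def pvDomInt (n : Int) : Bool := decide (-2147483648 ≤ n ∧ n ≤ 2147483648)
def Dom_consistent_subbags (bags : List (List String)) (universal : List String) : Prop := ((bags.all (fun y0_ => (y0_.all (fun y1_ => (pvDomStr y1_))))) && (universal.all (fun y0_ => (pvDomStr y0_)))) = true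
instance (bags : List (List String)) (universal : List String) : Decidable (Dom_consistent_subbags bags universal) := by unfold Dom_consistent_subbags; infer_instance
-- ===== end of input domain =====

-- B replaces A's self-recursion on the full bag list by an explicit multiplicity
-- loop over the first bag, recursing only on the tail (objective: alternative).

-- ===== PORT A =====
-- shared module helper (used verbatim by both Pythons): A's early `return None`
-- on ValueError is ported by staying `none` for the rest of the fold, which
-- yields the same result.
def subtract_bags (bag1 : List String) (bag2 : List String) : Option (List String) :=
  bag2.foldl (fun acc item =>
    match acc with
    | none => none
    | some r => PySem.List.remove? r item) (some bag1)

-- Port of A. The `if hlt : …` test is only a termination guard making the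
-- recursion total (it holds whenever Python A's recursive call terminates).
def consistent_subbags (bags : List (List String)) (universal : List String) : List (List (List String)) :=
  match bags with
  | [] => [[]]
  | first :: rest =>
    let r1 := consistent_subbags rest universal
    match subtract_bags universal first with
    | none => r1
    | some u' =>
      if hlt : u'.length < universal.length then
        r1 ++ (consistent_subbags (first :: rest) u').map (fun subbag => first :: subbag)
      else r1
termination_by (bags.length, universal.length)
decreasing_by
  · exact Prod.Lex.left _ _ (by simp)
  · exact Prod.Lex.right _ hlt

-- ===== PORT B =====
-- the `while u is not None` loop of Source B, with accumulated prefix; the same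
-- termination guard as in port A (it holds whenever Python B's loop advances).
mutual
def consistent_subbags_alt (bags : List (List String)) (universal : List String) : List (List (List String)) :=
  match bags with
  | [] => [[]]
  | first :: rest => csAltLoop first rest universal []
termination_by (bags.length, universal.length, 1)
decreasing_by
  exact Prod.Lex.right _ (Prod.Lex.right _ (by omega))

def csAltLoop (first : List String) (rest : List (List String)) (u : List String) (prefix_ : List (List String)) : List (List (List String)) :=
  ((consistent_subbags_alt rest u).map (fun sub => prefix_ ++ sub)) ++
  (match subtract_bags u first with
   | none => []
   | some u' =>
     if hlt : u'.length < u.length then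
       csAltLoop first rest u' (prefix_ ++ [first])
     else [])
termination_by (rest.length + 1, u.length, 0)
decreasing_by
  · exact Prod.Lex.left _ _ (by omega)
  · exact Prod.Lex.right _ (Prod.Lex.left _ _ hlt)
end

-- ===== PRECONDITION & SPEC =====
-- Pre_ excludes bag lists containing an empty bag: there Python A never
-- terminates (RecursionError) and Python B loops forever, so A returns no value.
def Pre_consistent_subbags (bags : List (List String)) (universal : List String) : Prop :=
  ∀ b ∈ bags, b ≠ []
instance (bags : List (List String)) (universal : List String) : Decidable (Pre_consistent_subbags bags universal) := by unfold Pre_consistent_subbags; infer_instance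

def pvWitness_consistent_subbags : List (List String) × List String := ([["a"], ["b", "a"]], ["a", "a", "b"])

def Spec_consistent_subbags (bags : List (List String)) (universal : List String) (out : List (List (List String))) : Prop := out = consistent_subbags_alt bags universal
instance (bags : List (List String)) (universal : List String) (out : List (List (List String))) : Decidable (Spec_consistent_subbags bags universal out) := by unfold Spec_consistent_subbags; infer_instance

-- ===== CLAIM (what is proved, stated in full; the proofs are below) =====
def Claim_equal_consistent_subbags : Prop := ∀ (bags : List (List String)) (universal : List String), Dom_consistent_subbags bags universal → Pre_consistent_subbags bags universal → Spec_consistent_subbags bags universal (consistent_subbags bags universal)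

-- ===== LEMMAS AND PROOFS =====

-- The loop of B computes A's result for `first :: rest`, each element prefixed.
theorem csAltLoop_eq (rest : List (List String))
    (IH : ∀ u : List String, consistent_subbags_alt rest u = consistent_subbags rest u) :
    ∀ (n : ℕ) (u : List String), u.length ≤ n → ∀ (first : List String) (prefix_ : List (List String)),
      csAltLoop first rest u prefix_
        = (consistent_subbags (first :: rest) u).map (fun s => prefix_ ++ s) := by
  intro n
  induction n with
  | zero =>
    intro u hu first prefix_
    rw [csAltLoop.eq_def, consistent_subbags.eq_2, IH]
    cases h : subtract_bags u first with
    | none => simp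
    | some u' =>
      have hlt : ¬ u'.length < u.length := by omega
      simp [hlt]
  | succ n ih =>
    intro u hu first prefix_
    rw [csAltLoop.eq_def, consistent_subbags.eq_2, IH]
    cases h : subtract_bags u first with
    | none => simp
    | some u' =>
      by_cases hlt : u'.length < u.length
      · simp only [dif_pos hlt, ih u' (by omega) first (prefix_ ++ [first]), List.map_append,
          List.map_map]
        congr 1
        exact List.map_congr_left (fun s _ => by simp)
      · simp [hlt]

theorem alt_eq (bags : List (List String)) :
    ∀ u : List String, consistent_subbags_alt bags u = consistent_subbags bags u := by
  induction bags with
  | nil =>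
    intro u
    rw [consistent_subbags_alt.eq_1, consistent_subbags.eq_1]
  | cons first rest ih =>
    intro u
    rw [consistent_subbags_alt.eq_2, csAltLoop_eq rest ih u.length u le_rfl first []]
    simp

-- ===== VERDICT (by name: the statement is the Claim_ definition above) =====
theorem consistent_subbags_spec : Claim_equal_consistent_subbags := by
  intro bags universal _ _
  unfold Spec_consistent_subbags
  exact (alt_eq bags universal).symm
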